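-- pv_equiv track=rewrite | github.com/chenchenxh/JEPG--Multimedia | jpeg/include/Sample.py | De_Sample
-- ===== SOURCE A (Python) =====
-- def De_Sample(matrix, size):
--     temp_matrix = []
--     for Y in range(0, size[1]):
--         for i in range(0, 2):
--             for X in range(0, size[0]):
--                 temp_matrix.append(matrix[X + Y*size[0]])
--                 temp_matrix.append(matrix[X + Y*size[0]])
--     return temp_matrix
-- ===== SOURCE B (Python) =====
-- def De_Sample(matrix, size):
--     w = size[0]
--     return [matrix[(c // 2) + (r // 2) * w]
--             for r in range(2 * size[1]) for c in range(2 * w)]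
-- ===== Notes on version B (the rewrite author's own statement) =====
-- stated objective: idiomatic
-- what changed: B iterates over the output grid in one comprehension, gathering each output element directly from the source via index arithmetic (c//2 + (r//2)*w), instead of A's three nested loops that scatter each source element with a row-duplication loop and a double append.
import Mathlib
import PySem

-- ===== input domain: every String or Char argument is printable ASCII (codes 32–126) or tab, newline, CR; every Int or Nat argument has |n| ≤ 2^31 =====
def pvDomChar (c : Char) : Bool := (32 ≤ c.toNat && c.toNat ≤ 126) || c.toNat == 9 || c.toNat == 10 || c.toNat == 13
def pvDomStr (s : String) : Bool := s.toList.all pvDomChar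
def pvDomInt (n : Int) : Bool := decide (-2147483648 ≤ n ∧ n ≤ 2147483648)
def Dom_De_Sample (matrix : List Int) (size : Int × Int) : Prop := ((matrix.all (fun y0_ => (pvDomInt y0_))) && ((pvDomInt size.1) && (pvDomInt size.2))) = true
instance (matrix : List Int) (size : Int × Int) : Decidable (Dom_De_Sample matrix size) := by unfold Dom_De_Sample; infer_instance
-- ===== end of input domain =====

-- B replaces A's scatter loops (row duplicated by an inner range(2) loop, element by a double
-- append) with a single gather comprehension over the output grid using index arithmetic.

-- ===== PORT A =====
def De_Sample (matrix : List Int) (size : Int × Int) : List Int :=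
  (PySem.List.pyRange 0 size.2 1).foldl (fun acc Y =>
    (PySem.List.pyRange 0 2 1).foldl (fun acc2 _i =>
      (PySem.List.pyRange 0 size.1 1).foldl (fun acc3 X =>
        acc3 ++ [PySem.List.pyGetD matrix (X + Y * size.1) 0,
                 PySem.List.pyGetD matrix (X + Y * size.1) 0]) acc2) acc) []

-- ===== PORT B =====
def De_Sample_alt (matrix : List Int) (size : Int × Int) : List Int :=
  (PySem.List.pyRange 0 (2 * size.2) 1).flatMap (fun r =>
    (PySem.List.pyRange 0 (2 * size.1) 1).map (fun c =>
      PySem.List.pyGetD matrix (PySem.Int.floordiv c 2 + PySem.Int.floordiv r 2 * size.1) 0))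

-- ===== PRECONDITION & SPEC =====
-- Pre_ excludes exactly the inputs where Python A raises IndexError: positive dimensions whose
-- product exceeds the matrix length.
def Pre_De_Sample (matrix : List Int) (size : Int × Int) : Prop :=
  0 < size.1 → 0 < size.2 → size.1 * size.2 ≤ matrix.length
instance (matrix : List Int) (size : Int × Int) : Decidable (Pre_De_Sample matrix size) := by
  unfold Pre_De_Sample; infer_instance
def pvWitness_De_Sample : List Int × (Int × Int) := ([1, 2], (2, 1))

def Spec_De_Sample (matrix : List Int) (size : Int × Int) (out : List Int) : Prop := out = De_Sample_alt matrix size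
instance (matrix : List Int) (size : Int × Int) (out : List Int) : Decidable (Spec_De_Sample matrix size out) := by unfold Spec_De_Sample; infer_instance

-- ===== CLAIM (what is proved, stated in full; the proofs are below) =====
def Claim_equal_De_Sample : Prop := ∀ (matrix : List Int) (size : Int × Int), Dom_De_Sample matrix size → Pre_De_Sample matrix size → Spec_De_Sample matrix size (De_Sample matrix size)

-- ===== LEMMAS AND PROOFS =====

-- range(0, 2n) consumed through k // 2 = each element of range(0, n) taken twice, flatMap form
theorem flatMap_pyRange_two_mul {α : Type} (g : Int → List α) (n : Int) :
    (PySem.List.pyRange 0 (2 * n) 1).flatMap (fun r => g (PySem.Int.floordiv r 2))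
      = (PySem.List.pyRange 0 n 1).flatMap (fun Y => g Y ++ g Y) := by
  by_cases h : n ≤ 0
  · rw [PySem.List.pyRange_one_eq_nil (by omega), PySem.List.pyRange_one_eq_nil (by omega)]
    simp
  · replace h : 0 < n := by omega
    obtain ⟨m, rfl⟩ : ∃ m : Nat, n = (m : Int) := ⟨n.toNat, by omega⟩
    induction m with
    | zero => simp at h
    | succ m ih =>
      have h2 : (2 : Int) * (m + 1 : Nat) = (2 * m + 1) + 1 := by push_cast; ring
      have hm : ((m + 1 : Nat) : Int) = (m : Int) + 1 := by push_cast; ring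
      rw [h2, hm, PySem.List.pyRange_one_succ_right (by positivity),
          PySem.List.pyRange_one_succ_right (by positivity),
          PySem.List.pyRange_one_succ_right (by positivity)]
      rcases Nat.eq_zero_or_pos m with rfl | hm0
      · simp [PySem.List.pyRange_one_eq_nil]
      · rw [List.flatMap_append, List.flatMap_append, List.flatMap_append,
            ih (by exact_mod_cast hm0)]
        have e1 : PySem.Int.floordiv ((2 : Int) * m) 2 = (m : Int) := by
          rw [PySem.Int.floordiv_eq_ediv_of_pos (by omega)]; omega
        have e2 : PySem.Int.floordiv ((2 : Int) * m + 1) 2 = (m : Int) := by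
          rw [PySem.Int.floordiv_eq_ediv_of_pos (by omega)]; omega
        have e3 : ((2 : Int) * m + 1) / 2 = (m : Int) := by omega
        simp [e3]

-- same fact in map form: one row of B equals the doubled-element row
theorem map_pyRange_two_mul {α : Type} (g : Int → α) (n : Int) :
    (PySem.List.pyRange 0 (2 * n) 1).map (fun c => g (PySem.Int.floordiv c 2))
      = (PySem.List.pyRange 0 n 1).flatMap (fun X => [g X, g X]) := by
  rw [List.map_eq_flatMap]
  exact flatMap_pyRange_two_mul (fun x => [g x]) n

theorem De_Sample_spec_core (matrix : List Int) (size : Int × Int) :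
    De_Sample matrix size = De_Sample_alt matrix size := by
  unfold De_Sample De_Sample_alt
  have hrow : ∀ (Y : Int) (acc2 : List Int),
      (PySem.List.pyRange 0 size.1 1).foldl (fun acc3 X =>
        acc3 ++ [PySem.List.pyGetD matrix (X + Y * size.1) 0,
                 PySem.List.pyGetD matrix (X + Y * size.1) 0]) acc2
      = acc2 ++ (PySem.List.pyRange 0 size.1 1).flatMap (fun X =>
          [PySem.List.pyGetD matrix (X + Y * size.1) 0,
           PySem.List.pyGetD matrix (X + Y * size.1) 0]) := by
    intro Y acc2
    exact PySem.List.foldl_append_eq_flatMap _ _ _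
  have h2 : PySem.List.pyRange 0 2 1 = [0, 1] := by decide
  simp only [h2, List.foldl_cons, List.foldl_nil, hrow]
  rw [show (fun (acc : List Int) (Y : Int) =>
        acc ++ (PySem.List.pyRange 0 size.1 1).flatMap (fun X =>
          [PySem.List.pyGetD matrix (X + Y * size.1) 0,
           PySem.List.pyGetD matrix (X + Y * size.1) 0])
          ++ (PySem.List.pyRange 0 size.1 1).flatMap (fun X =>
          [PySem.List.pyGetD matrix (X + Y * size.1) 0,
           PySem.List.pyGetD matrix (X + Y * size.1) 0]))
      = (fun (acc : List Int) (Y : Int) =>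
        acc ++ ((PySem.List.pyRange 0 size.1 1).flatMap (fun X =>
          [PySem.List.pyGetD matrix (X + Y * size.1) 0,
           PySem.List.pyGetD matrix (X + Y * size.1) 0])
          ++ (PySem.List.pyRange 0 size.1 1).flatMap (fun X =>
          [PySem.List.pyGetD matrix (X + Y * size.1) 0,
           PySem.List.pyGetD matrix (X + Y * size.1) 0])))
      from by funext acc Y; simp [List.append_assoc]]
  rw [PySem.List.foldl_append_eq_flatMap, List.nil_append]
  rw [flatMap_pyRange_two_mul (fun Y =>
    (PySem.List.pyRange 0 (2 * size.1) 1).map (fun c =>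
      PySem.List.pyGetD matrix (PySem.Int.floordiv c 2 + Y * size.1) 0)) size.2]
  refine List.flatMap_congr ?_
  intro Y _
  rw [map_pyRange_two_mul (fun X => PySem.List.pyGetD matrix (X + Y * size.1) 0) size.1]

-- ===== VERDICT (by name: the statement is the Claim_ definition above) =====
theorem De_Sample_spec : Claim_equal_De_Sample := by
  intro matrix size _ _
  exact De_Sample_spec_core matrix size
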